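-- pv_equiv track=rewrite | github.com/Tsurkan/advent-of-code | 2025/day4/script.py | simulate_full_removal
-- ===== SOURCE A (Python) =====
-- from typing import List, Tuple, Deque
-- from collections import deque
--
-- DIRECTIONS: List[Tuple[int, int]] = [
--     (-1, -1), (-1, 0), (-1, 1),
--     (0, -1),          (0, 1),
--     (1, -1), (1, 0),  (1, 1)
-- ]
--
-- def count_neighbors(grid: List[List[str]]) -> List[List[int]]:
--     """
--     Підраховує кількість сусідів '@' для кожної клітинки, перевіряємо 8 напрямків.
--
--     Складність: O(H * W * 8) → O(H * W)
--     """
--     h = len(grid)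
--     w = len(grid[0])
--     neighbors = [[0] * w for _ in range(h)]
--
--     for r in range(h):
--         for c in range(w):
--             if grid[r][c] != "@":
--                 continue
--
--             cnt = 0
--             for dr, dc in DIRECTIONS:
--                 nr, nc = r + dr, c + dc
--                 if 0 <= nr < h and 0 <= nc < w and grid[nr][nc] == "@":
--                     cnt += 1
--
--             neighbors[r][c] = cnt
--
--     return neighbors
--
-- def find_initial_queue(grid: List[List[str]], neighbors: List[List[int]]) -> Deque[Tuple[int, int]]:
--     """
--     Повертає чергу BFS з усіх клітинок '@', які мають < 4 сусідів.
--
--     Складність: O(H * W)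
--     """
--     q = deque()
--     h = len(grid)
--     w = len(grid[0])
--
--     for r in range(h):
--         for c in range(w):
--             if grid[r][c] == "@" and neighbors[r][c] < 4:
--                 q.append((r, c))
--
--     return q
--
-- def simulate_full_removal(grid: List[List[str]]) -> int:
--     """
--     Повна симуляція видалення всіх доступних рулонів паперу. Використовуємо BFS Wave Elimination.
--
--     Складність: O(H * W)
--
--     Повертає: Загальна кількість видалених рулонів.
--     """
--     h = len(grid)
--     w = len(grid[0])
--
--     neighbors = count_neighbors(grid)
--     queue = find_initial_queue(grid, neighbors)
--
--     removed = 0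
--
--     while queue:
--         r, c = queue.popleft()
--
--         # Якщо вже видалили раніше → пропускаємо
--         if grid[r][c] != "@":
--             continue
--
--         # Видаляємо рулон
--         grid[r][c] = "."
--         removed += 1
--
--         # Оновлюємо 8 сусідів
--         for dr, dc in DIRECTIONS:
--             nr, nc = r + dr, c + dc
--             if not (0 <= nr < h and 0 <= nc < w):
--                 continue
--
--             # Зменшуємо їхній лічильник сусідів
--             if grid[nr][nc] == "@":
--                 neighbors[nr][nc] -= 1
--
--                 # Якщо тепер сусідів < 4 → додаємо в BFS-чергу
--                 if neighbors[nr][nc] < 4: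
--                     queue.append((nr, nc))
--
--     return removed
-- ===== SOURCE B (Python) =====
-- from typing import List, Tuple
--
-- DIRECTIONS: List[Tuple[int, int]] = [
--     (-1, -1), (-1, 0), (-1, 1),
--     (0, -1),          (0, 1),
--     (1, -1), (1, 0),  (1, 1)
-- ]
--
-- def simulate_full_removal(grid: List[List[str]]) -> int:
--     """Iterate-until-stable fixed point: each pass removes every '@' cell whose
--     current 8-neighbor '@' count is < 4; stop when a pass removes nothing.
--     Like the original, mutates grid in place ('@' -> '.')."""
--     h = len(grid)
--     w = len(grid[0])
--     removed = 0
--     while True: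
--         batch = [
--             (r, c)
--             for r in range(h)
--             for c in range(w)
--             if grid[r][c] == "@"
--             and sum(
--                 1
--                 for dr, dc in DIRECTIONS
--                 if 0 <= r + dr < h and 0 <= c + dc < w and grid[r + dr][c + dc] == "@"
--             ) < 4
--         ]
--         if not batch:
--             return removed
--         for r, c in batch:
--             grid[r][c] = "."
--         removed += len(batch)
-- ===== Notes on version B (the rewrite author's own statement) =====
-- stated objective: simpler
-- what changed: Replaces A's BFS wave (an explicit deque plus a persistent, incrementally-decremented neighbor-count table) by a queue-free iterate-until-stable fixed point: repeatedly sweep the whole grid, remove every '@' cell whose current 8-neighbor '@' count is below 4, and stop when a sweep removes nothing; the result is equal because the removal predicate is monotone, so any removal order reaches the same maximal stable set (the 4-core).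
import Mathlib
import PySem

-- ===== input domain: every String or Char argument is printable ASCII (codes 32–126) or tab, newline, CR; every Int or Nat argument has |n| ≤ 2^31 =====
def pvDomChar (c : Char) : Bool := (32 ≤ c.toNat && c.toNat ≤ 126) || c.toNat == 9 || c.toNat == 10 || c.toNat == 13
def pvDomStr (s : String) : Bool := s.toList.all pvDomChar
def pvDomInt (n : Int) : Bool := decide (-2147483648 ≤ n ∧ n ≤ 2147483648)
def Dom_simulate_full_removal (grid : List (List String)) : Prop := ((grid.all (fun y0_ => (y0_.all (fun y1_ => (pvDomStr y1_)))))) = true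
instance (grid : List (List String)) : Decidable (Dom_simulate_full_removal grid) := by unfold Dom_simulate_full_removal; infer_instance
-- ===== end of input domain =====

-- B replaces A's BFS wave (queue + persistent neighbor-count table) by an iterate-until-stable
-- fixed point: repeated whole-grid passes that remove every '@' cell with < 4 live neighbors.
-- Both Pythons mutate `grid` in place the same way; the equivalence proved here is about the
-- return value.

-- ===== PORT A =====
-- DIRECTIONS
def pvDirs : List (Int × Int) :=
  [(-1, -1), (-1, 0), (-1, 1), (0, -1), (0, 1), (1, -1), (1, 0), (1, 1)]

-- grid[r][c] for the nonnegative in-range indices the programs use (out of range: Python raises,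
-- excluded by Pre_)
def pvCell (g : List (List String)) (r c : Nat) : String := (g.getD r []).getD c ""

-- grid[r][c] = v
def pvSet2 {α : Type} (g : List (List α)) (r c : Nat) (v : α) : List (List α) :=
  g.set r ((g.getD r []).set c v)

-- the inner `cnt` loop of count_neighbors
def pvCnt (h w : Nat) (g : List (List String)) (r c : Nat) : Int :=
  pvDirs.foldl (fun cnt d =>
    if 0 ≤ (r : Int) + d.1 ∧ (r : Int) + d.1 < (h : Int) ∧
       0 ≤ (c : Int) + d.2 ∧ (c : Int) + d.2 < (w : Int) ∧
       pvCell g ((r : Int) + d.1).toNat ((c : Int) + d.2).toNat = "@"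
    then cnt + 1 else cnt) 0

-- count_neighbors
def pvCountNeighbors (g : List (List String)) : List (List Int) :=
  let h := g.length
  let w := (g.getD 0 []).length
  (List.range h).foldl (fun N r =>
    (List.range w).foldl (fun N c =>
      if pvCell g r c ≠ "@" then N
      else pvSet2 N r c (pvCnt h w g r c)) N)
    (List.replicate h (List.replicate w 0))

-- neighbors[r][c]
def pvGetN (N : List (List Int)) (r c : Nat) : Int := (N.getD r []).getD c 0

-- find_initial_queue
def pvInitQueue (g : List (List String)) (N : List (List Int)) : List (Nat × Nat) :=
  let h := g.length
  let w := (g.getD 0 []).length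
  (List.range h).foldl (fun q r =>
    (List.range w).foldl (fun q c =>
      if pvCell g r c = "@" ∧ pvGetN N r c < 4 then q ++ [(r, c)] else q) q) []

-- number of '@' cells, the termination measure of the while-loops
def pvCountAt (g : List (List String)) : Nat := (g.map (fun row => row.count "@")).sum

lemma pvRowcount_set_le (row : List String) (c : Nat) :
    (row.set c ".").count "@" ≤ row.count "@" := by
  induction row generalizing c with
  | nil => simp
  | cons x xs ih =>
    cases c with
    | zero => simp [List.count_cons]
    | succ c =>
      simp only [List.set_cons_succ, List.count_cons]
      have := ih c
      omega

lemma pvRowcount_set_lt (row : List String) (c : Nat) (hc : row.getD c "" = "@") :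
    (row.set c ".").count "@" < row.count "@" := by
  induction row generalizing c with
  | nil => simp at hc
  | cons x xs ih =>
    cases c with
    | zero => simp_all
    | succ c =>
      simp only [List.getD_cons_succ] at hc
      simp only [List.set_cons_succ, List.count_cons]
      have := ih c hc
      omega

lemma pvCountAt_set2_le (g : List (List String)) (r c : Nat) :
    pvCountAt (pvSet2 g r c ".") ≤ pvCountAt g := by
  induction g generalizing r with
  | nil => simp [pvSet2, pvCountAt]
  | cons row rows ih =>
    cases r with
    | zero =>
      simp only [pvSet2, pvCountAt, List.getD_cons_zero, List.set_cons_zero, List.map_cons,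
        List.sum_cons]
      have := pvRowcount_set_le row c
      omega
    | succ r =>
      simp only [pvSet2, pvCountAt, List.getD_cons_succ, List.set_cons_succ, List.map_cons,
        List.sum_cons] at *
      have := ih r
      simp only [pvCountAt] at this
      omega

lemma pvCountAt_set2_lt (g : List (List String)) (r c : Nat)
    (hc : pvCell g r c = "@") : pvCountAt (pvSet2 g r c ".") < pvCountAt g := by
  induction g generalizing r with
  | nil => simp [pvCell] at hc
  | cons row rows ih =>
    cases r with
    | zero =>
      simp only [pvCell, List.getD_cons_zero] at hc
      simp only [pvSet2, pvCountAt, List.getD_cons_zero, List.set_cons_zero, List.map_cons,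
        List.sum_cons]
      have := pvRowcount_set_lt row c hc
      omega
    | succ r =>
      simp only [pvCell, List.getD_cons_succ] at hc
      simp only [pvSet2, pvCountAt, List.getD_cons_succ, List.set_cons_succ, List.map_cons,
        List.sum_cons]
      have := ih r hc
      simp only [pvSet2, pvCountAt] at this
      omega

-- the body of the `for dr, dc in DIRECTIONS` update loop in the while-loop's removal branch:
-- skip out-of-bounds neighbors, decrement the neighbor count of '@' cells, enqueue those
-- that drop below 4
def pvStep (h w : Nat) (g : List (List String)) (r c : Nat)
    (st : List (List Int) × List (Nat × Nat)) (d : Int × Int) :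
    List (List Int) × List (Nat × Nat) :=
  if 0 ≤ (r : Int) + d.1 ∧ (r : Int) + d.1 < (h : Int) ∧
     0 ≤ (c : Int) + d.2 ∧ (c : Int) + d.2 < (w : Int) then
    if pvCell g ((r : Int) + d.1).toNat ((c : Int) + d.2).toNat = "@" then
      if pvGetN (pvSet2 st.1 ((r : Int) + d.1).toNat ((c : Int) + d.2).toNat
            (pvGetN st.1 ((r : Int) + d.1).toNat ((c : Int) + d.2).toNat - 1))
          ((r : Int) + d.1).toNat ((c : Int) + d.2).toNat < 4 then
        (pvSet2 st.1 ((r : Int) + d.1).toNat ((c : Int) + d.2).toNat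
            (pvGetN st.1 ((r : Int) + d.1).toNat ((c : Int) + d.2).toNat - 1),
          st.2 ++ [(((r : Int) + d.1).toNat, ((c : Int) + d.2).toNat)])
      else
        (pvSet2 st.1 ((r : Int) + d.1).toNat ((c : Int) + d.2).toNat
            (pvGetN st.1 ((r : Int) + d.1).toNat ((c : Int) + d.2).toNat - 1),
          st.2)
    else st
  else st

-- the `for dr, dc in DIRECTIONS` update loop itself
def pvUpdate (h w : Nat) (g : List (List String)) (r c : Nat)
    (st : List (List Int) × List (Nat × Nat)) : List (List Int) × List (Nat × Nat) :=
  pvDirs.foldl (pvStep h w g r c) st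

-- the `while queue` loop
def pvLoopA (h w : Nat) (g : List (List String)) (N : List (List Int))
    (q : List (Nat × Nat)) (removed : Int) : Int :=
  match q with
  | [] => removed
  | (r, c) :: qt =>
    if pvCell g r c ≠ "@" then pvLoopA h w g N qt removed
    else
      let g' := pvSet2 g r c "."
      let st := pvUpdate h w g' r c (N, qt)
      pvLoopA h w g' st.1 st.2 (removed + 1)
  termination_by (pvCountAt g, q.length)
  decreasing_by
  · exact Prod.Lex.right _ (Nat.lt_succ_self _)
  · exact Prod.Lex.left _ _ (pvCountAt_set2_lt g r c (by simp_all))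

def simulate_full_removal (grid : List (List String)) : Int :=
  let h := grid.length
  let w := (grid.getD 0 []).length
  let neighbors := pvCountNeighbors grid
  let queue := pvInitQueue grid neighbors
  pvLoopA h w grid neighbors queue 0

-- ===== PORT B =====
-- the neighbor-count generator expression `sum(1 for dr, dc in DIRECTIONS if ...)`
def pvCntB (h w : Nat) (g : List (List String)) (r c : Nat) : Int :=
  (pvDirs.map (fun d =>
    if 0 ≤ (r : Int) + d.1 ∧ (r : Int) + d.1 < (h : Int) ∧
       0 ≤ (c : Int) + d.2 ∧ (c : Int) + d.2 < (w : Int) ∧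
       pvCell g ((r : Int) + d.1).toNat ((c : Int) + d.2).toNat = "@"
    then (1 : Int) else 0)).sum

-- the batch comprehension: all (r, c) with grid[r][c] == "@" and < 4 live neighbors
def pvBatch (h w : Nat) (g : List (List String)) : List (Nat × Nat) :=
  (List.range h).flatMap (fun r =>
    ((List.range w).filter (fun c => pvCell g r c = "@" ∧ pvCntB h w g r c < 4)).map
      (fun c => (r, c)))

lemma pvBatch_mem_at (h w : Nat) (g : List (List String)) (p : Nat × Nat)
    (hp : p ∈ pvBatch h w g) : pvCell g p.1 p.2 = "@" := by
  simp only [pvBatch, List.mem_flatMap, List.mem_map, List.mem_filter, List.mem_range] at hp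
  obtain ⟨r, _, c, ⟨_, hc⟩, rfl⟩ := hp
  have hc' : pvCell g r c = "@" ∧ pvCntB h w g r c < 4 := by simpa using hc
  exact hc'.1

lemma pvCountAt_foldl_le (l : List (Nat × Nat)) (g : List (List String)) :
    pvCountAt (l.foldl (fun g p => pvSet2 g p.1 p.2 ".") g) ≤ pvCountAt g := by
  induction l generalizing g with
  | nil => simp
  | cons p l ih =>
    rw [List.foldl_cons]
    calc pvCountAt (l.foldl (fun g p => pvSet2 g p.1 p.2 ".") (pvSet2 g p.1 p.2 "."))
        ≤ pvCountAt (pvSet2 g p.1 p.2 ".") := ih _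
      _ ≤ pvCountAt g := pvCountAt_set2_le g p.1 p.2

lemma pvCountAt_batch_lt (h w : Nat) (g : List (List String))
    (hne : pvBatch h w g ≠ []) :
    pvCountAt ((pvBatch h w g).foldl (fun g p => pvSet2 g p.1 p.2 ".") g) < pvCountAt g := by
  obtain ⟨p, l, he⟩ := List.exists_cons_of_ne_nil hne
  have hp : p ∈ pvBatch h w g := by rw [he]; exact List.mem_cons_self
  have h1 := pvCountAt_set2_lt g p.1 p.2 (pvBatch_mem_at h w g p hp)
  rw [he, List.foldl_cons]
  calc pvCountAt (l.foldl (fun g p => pvSet2 g p.1 p.2 ".") (pvSet2 g p.1 p.2 "."))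
      ≤ pvCountAt (pvSet2 g p.1 p.2 ".") := pvCountAt_foldl_le _ _
    _ < pvCountAt g := h1

-- the `while True` loop
def pvLoopB (h w : Nat) (g : List (List String)) (removed : Int) : Int :=
  let batch := pvBatch h w g
  if hne : batch = [] then removed
  else pvLoopB h w (batch.foldl (fun g p => pvSet2 g p.1 p.2 ".") g)
        (removed + batch.length)
  termination_by pvCountAt g
  decreasing_by exact pvCountAt_batch_lt h w g hne

def simulate_full_removal_alt (grid : List (List String)) : Int :=
  pvLoopB grid.length (grid.getD 0 []).length grid 0

-- ===== PRECONDITION & SPEC =====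
-- Pre_ excludes exactly the inputs where Python A raises IndexError: the empty grid
-- (grid[0]) and ragged grids with a row shorter than row 0 (grid[r][c] for c < w).
def Pre_simulate_full_removal (grid : List (List String)) : Prop :=
  grid ≠ [] ∧ ∀ row ∈ grid, (grid.headD []).length ≤ row.length

instance (grid : List (List String)) : Decidable (Pre_simulate_full_removal grid) := by
  unfold Pre_simulate_full_removal; infer_instance

def pvWitness_simulate_full_removal : List (List String) :=
  [["@", "@", "."], ["@", "@", "@"], [".", "@", "@"]]

def Spec_simulate_full_removal (grid : List (List String)) (out : Int) : Prop := out = simulate_full_removal_alt grid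
instance (grid : List (List String)) (out : Int) : Decidable (Spec_simulate_full_removal grid out) := by unfold Spec_simulate_full_removal; infer_instance

-- ===== CLAIM (what is proved, stated in full; the proofs are below) =====
def Claim_equal_simulate_full_removal : Prop := ∀ (grid : List (List String)), Dom_simulate_full_removal grid → Pre_simulate_full_removal grid → Spec_simulate_full_removal grid (simulate_full_removal grid)

-- ===== LEMMAS AND PROOFS =====

-- ---- abstract layer: live cells, neighbor lists, degree, greatest closed subset ----

-- in-bounds neighbor targets reached from (r, c) by the offsets in ds
def pvTgts (h w : Nat) (ds : List (Int × Int)) (r c : Nat) : List (Nat × Nat) :=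
  ds.filterMap (fun d =>
    if 0 ≤ (r : Int) + d.1 ∧ (r : Int) + d.1 < (h : Int) ∧
       0 ≤ (c : Int) + d.2 ∧ (c : Int) + d.2 < (w : Int)
    then some (((r : Int) + d.1).toNat, ((c : Int) + d.2).toNat) else none)

def pvNbrs (h w r c : Nat) : List (Nat × Nat) := pvTgts h w pvDirs r c

def pvDeg (h w : Nat) (S : Finset (Nat × Nat)) (r c : Nat) : Nat :=
  (pvNbrs h w r c).countP (· ∈ S)

def pvLive (h w : Nat) (g : List (List String)) : Finset (Nat × Nat) :=
  (Finset.range h ×ˢ Finset.range w).filter (fun p => pvCell g p.1 p.2 = "@")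

def pvClosed (h w : Nat) (S : Finset (Nat × Nat)) : Prop :=
  ∀ p ∈ S, 4 ≤ pvDeg h w S p.1 p.2

def pvCore (h w : Nat) (X : Finset (Nat × Nat)) : Finset (Nat × Nat) :=
  (X.powerset.filter fun S => ∀ p ∈ S, 4 ≤ pvDeg h w S p.1 p.2).sup id

def pvShape (h w : Nat) (g : List (List String)) : Prop :=
  g.length = h ∧ ∀ row ∈ g, w ≤ row.length

lemma pvMem_tgts (h w : Nat) (ds : List (Int × Int)) (r c : Nat) (x : Nat × Nat) :
    x ∈ pvTgts h w ds r c ↔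
      x.1 < h ∧ x.2 < w ∧ ((x.1 : Int) - r, (x.2 : Int) - c) ∈ ds := by
  obtain ⟨x1, x2⟩ := x
  simp only [pvTgts, List.mem_filterMap]
  constructor
  · rintro ⟨d, hd, he⟩
    split_ifs at he with hb
    · obtain ⟨e1, e2⟩ := Prod.mk.injEq .. ▸ Option.some.inj he
      refine ⟨by omega, by omega, ?_⟩
      have h1 : ((x1 : Int) - r, (x2 : Int) - c) = d := by
        obtain ⟨d1, d2⟩ := d
        simp only [Prod.mk.injEq]
        constructor <;> omega
      rw [h1]; exact hd
  · rintro ⟨h1, h2, hd⟩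
    refine ⟨((x1 : Int) - r, (x2 : Int) - c), hd, ?_⟩
    have hb : 0 ≤ (r : Int) + ((x1 : Int) - r) ∧ (r : Int) + ((x1 : Int) - r) < (h : Int) ∧
        0 ≤ (c : Int) + ((x2 : Int) - c) ∧ (c : Int) + ((x2 : Int) - c) < (w : Int) := by omega
    rw [if_pos hb]
    simp only [Option.some.injEq, Prod.mk.injEq]
    constructor <;> omega

lemma pvNodup_tgts (h w : Nat) (ds : List (Int × Int)) (r c : Nat) (hds : ds.Nodup) :
    (pvTgts h w ds r c).Nodup := by
  refine List.Nodup.filterMap ?_ hds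
  intro a a' x ha hb
  rw [Option.mem_def] at ha hb
  split_ifs at ha hb with h1 h2
  · have e1 := Option.some.inj ha
    rw [← Option.some.inj hb] at e1
    obtain ⟨a1, a2⟩ := a; obtain ⟨b1, b2⟩ := a'
    simp only [Prod.mk.injEq] at e1 ⊢
    constructor <;> omega

lemma pvMem_live (h w : Nat) (g : List (List String)) (x : Nat × Nat) :
    x ∈ pvLive h w g ↔ x.1 < h ∧ x.2 < w ∧ pvCell g x.1 x.2 = "@" := by
  simp [pvLive, Finset.mem_filter, Finset.mem_product, and_assoc]

lemma pvDeg_mono (h w : Nat) (S T : Finset (Nat × Nat)) (r c : Nat) (hST : S ⊆ T) :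
    pvDeg h w S r c ≤ pvDeg h w T r c := by
  exact List.countP_mono_left (fun x _ hx => by
    simp only [decide_eq_true_eq] at *; exact hST hx)

lemma pvCountP_erase (l : List (Nat × Nat)) (hl : l.Nodup) (S : Finset (Nat × Nat))
    (p : Nat × Nat) :
    l.countP (· ∈ S.erase p) + (if p ∈ l ∧ p ∈ S then 1 else 0) = l.countP (· ∈ S) := by
  induction l with
  | nil => simp
  | cons a t ih =>
    have hna : a ∉ t := (List.nodup_cons.mp hl).1
    have iht := ih (List.nodup_cons.mp hl).2
    simp only [List.countP_cons, List.mem_cons]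
    by_cases hap : p = a
    · subst hap
      have hnp : ¬(p ∈ t ∧ p ∈ S) := fun hh => hna hh.1
      rw [if_neg hnp] at iht
      by_cases hpS : p ∈ S <;>
        simp_all [Finset.mem_erase] <;> omega
    · by_cases haS : a ∈ S <;> by_cases hpt : p ∈ t <;> by_cases hpS : p ∈ S <;>
        simp_all [Finset.mem_erase, Ne.symm hap, hap] <;> omega

lemma pvCore_subset (h w : Nat) (X : Finset (Nat × Nat)) : pvCore h w X ⊆ X := by
  intro p hp
  rw [pvCore, Finset.mem_sup] at hp
  obtain ⟨S, hS, hpS⟩ := hp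
  exact Finset.mem_powerset.mp (Finset.mem_filter.mp hS).1 hpS

lemma pvSubset_core (h w : Nat) (X S : Finset (Nat × Nat)) (hc : pvClosed h w S)
    (hX : S ⊆ X) : S ⊆ pvCore h w X :=
  Finset.le_sup (f := id) (Finset.mem_filter.mpr ⟨Finset.mem_powerset.mpr hX, fun p hp => hc p hp⟩)

lemma pvCore_closed (h w : Nat) (X : Finset (Nat × Nat)) : pvClosed h w (pvCore h w X) := by
  intro p hp
  rw [pvCore, Finset.mem_sup] at hp
  obtain ⟨S, hS, hpS⟩ := hp
  have hSc : pvClosed h w S := (Finset.mem_filter.mp hS).2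
  have hsub : S ⊆ pvCore h w X :=
    pvSubset_core h w X S hSc (Finset.mem_powerset.mp (Finset.mem_filter.mp hS).1)
  calc 4 ≤ pvDeg h w S p.1 p.2 := hSc p hpS
    _ ≤ pvDeg h w (pvCore h w X) p.1 p.2 := pvDeg_mono _ _ _ _ _ _ hsub

lemma pvCore_eq_self (h w : Nat) (X : Finset (Nat × Nat)) (hc : pvClosed h w X) :
    pvCore h w X = X :=
  Finset.Subset.antisymm (pvCore_subset h w X) (pvSubset_core h w X X hc (le_refl X))

lemma pvCore_sdiff (h w : Nat) (X B : Finset (Nat × Nat))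
    (hB : ∀ p ∈ B, pvDeg h w X p.1 p.2 < 4) :
    pvCore h w (X \ B) = pvCore h w X := by
  have hcc := pvCore_closed h w X
  have hcs := pvCore_subset h w X
  have hdisj : ∀ p ∈ pvCore h w X, p ∉ B := by
    intro p hp hpB
    have h4 := hcc p hp
    have := pvDeg_mono h w (pvCore h w X) X p.1 p.2 hcs
    have := hB p hpB
    omega
  have h1 : pvCore h w X ⊆ X \ B := fun p hp =>
    Finset.mem_sdiff.mpr ⟨hcs hp, hdisj p hp⟩
  apply Finset.Subset.antisymm
  · exact pvSubset_core h w X _ (pvCore_closed h w (X \ B))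
      ((pvCore_subset h w (X \ B)).trans (Finset.sdiff_subset))
  · exact pvSubset_core h w (X \ B) _ hcc h1

-- ---- grid update vs live set ----

lemma pvGetD_set_self {α : Type} (l : List α) (i : Nat) (v d : α) (hi : i < l.length) :
    (l.set i v).getD i d = v := by
  simp [List.getD_eq_getElem?_getD, hi]

lemma pvGetD_set_ne {α : Type} (l : List α) (i j : Nat) (v d : α) (hij : i ≠ j) :
    (l.set i v).getD j d = l.getD j d := by
  simp [List.getD_eq_getElem?_getD, List.getElem?_set_ne, hij]

lemma pvCell_set2 (g : List (List String)) (r c x y : Nat) (v : String)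
    (hr : r < g.length) (hc : c < (g.getD r []).length) :
    pvCell (pvSet2 g r c v) x y = if x = r ∧ y = c then v else pvCell g x y := by
  unfold pvCell pvSet2
  by_cases hx : x = r
  · subst hx
    rw [pvGetD_set_self _ _ _ _ hr]
    by_cases hy : y = c
    · subst hy
      rw [pvGetD_set_self _ _ _ _ hc, if_pos ⟨rfl, rfl⟩]
    · rw [pvGetD_set_ne _ _ _ _ _ (Ne.symm hy), if_neg (fun hh => hy hh.2)]
  · rw [pvGetD_set_ne _ _ _ _ _ (fun hh => hx hh.symm), if_neg (fun hh => hx hh.1)]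

lemma pvRow_mem (g : List (List String)) (r : Nat) (hr : r < g.length) :
    g.getD r [] ∈ g := by
  rw [List.getD_eq_getElem?_getD, List.getElem?_eq_getElem hr]
  exact List.getElem_mem hr

lemma pvShape_set2 (h w : Nat) (g : List (List String)) (r c : Nat) (v : String)
    (hs : pvShape h w g) : pvShape h w (pvSet2 g r c v) := by
  obtain ⟨h1, h2⟩ := hs
  by_cases hr : r < g.length
  · refine ⟨by simpa [pvSet2] using h1, ?_⟩
    intro row hrow
    rcases List.mem_or_eq_of_mem_set hrow with hmem | rfl
    · exact h2 _ hmem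
    · rw [List.length_set]
      exact h2 _ (pvRow_mem g r hr)
  · rw [pvSet2, List.set_eq_of_length_le (by omega)]
    exact ⟨h1, h2⟩

lemma pvLive_set2 (h w : Nat) (g : List (List String)) (r c : Nat)
    (hs : pvShape h w g) (hr : r < h) (hc : c < w) :
    pvLive h w (pvSet2 g r c ".") = (pvLive h w g).erase (r, c) := by
  have hrg : r < g.length := by have := hs.1; omega
  have hcw : c < (g.getD r []).length := lt_of_lt_of_le hc (hs.2 _ (pvRow_mem g r hrg))
  ext ⟨x, y⟩
  simp only [pvMem_live, Finset.mem_erase, pvCell_set2 g r c x y "." hrg hcw]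
  by_cases hxy : x = r ∧ y = c
  · obtain ⟨rfl, rfl⟩ := hxy
    simp
  · rw [if_neg hxy]
    by_cases hx : x = r <;> by_cases hy : y = c <;> simp_all [Prod.ext_iff]

-- ---- degree lemmas ----

lemma pvDirs_nodup : pvDirs.Nodup := by decide

lemma pvNbrs_nodup (h w r c : Nat) : (pvNbrs h w r c).Nodup :=
  pvNodup_tgts h w pvDirs r c pvDirs_nodup

lemma pvDeg_erase (h w : Nat) (S : Finset (Nat × Nat)) (p : Nat × Nat) (x y : Nat)
    (hp : p ∈ S) :
    pvDeg h w (S.erase p) x y + (if p ∈ pvNbrs h w x y then 1 else 0) = pvDeg h w S x y := by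
  have hkey := pvCountP_erase (pvNbrs h w x y) (pvNbrs_nodup h w x y) S p
  by_cases hm : p ∈ pvNbrs h w x y <;> simp_all [pvDeg]

lemma pvNbrs_symm (h w : Nat) (r c x y : Nat) (hr : r < h) (hc : c < w)
    (hx : x < h) (hy : y < w) :
    ((r, c) ∈ pvNbrs h w x y) ↔ ((x, y) ∈ pvNbrs h w r c) := by
  have hneg : ∀ d : Int × Int, d ∈ pvDirs → (-d.1, -d.2) ∈ pvDirs := by decide
  simp only [pvNbrs, pvMem_tgts]
  constructor
  · rintro ⟨-, -, hd⟩
    refine ⟨hx, hy, ?_⟩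
    have h2 := hneg _ hd
    have e : ((x : Int) - r, (y : Int) - c) = (-((r : Int) - x), -((c : Int) - y)) := by
      simp only [Prod.mk.injEq]; constructor <;> ring
    rw [e]; exact h2
  · rintro ⟨-, -, hd⟩
    refine ⟨hr, hc, ?_⟩
    have h2 := hneg _ hd
    have e : ((r : Int) - x, (c : Int) - y) = (-((x : Int) - r), -((y : Int) - c)) := by
      simp only [Prod.mk.injEq]; constructor <;> ring
    rw [e]; exact h2

-- ---- the port's neighbor counts equal the abstract degree ----

lemma pvCnt_eq (h w : Nat) (g : List (List String)) (r c : Nat) :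
    pvCnt h w g r c = (pvDeg h w (pvLive h w g) r c : Int) := by
  have key : ∀ (ds : List (Int × Int)) (acc : Int),
      ds.foldl (fun cnt d =>
        if 0 ≤ (r : Int) + d.1 ∧ (r : Int) + d.1 < (h : Int) ∧
           0 ≤ (c : Int) + d.2 ∧ (c : Int) + d.2 < (w : Int) ∧
           pvCell g ((r : Int) + d.1).toNat ((c : Int) + d.2).toNat = "@"
        then cnt + 1 else cnt) acc
      = acc + ((pvTgts h w ds r c).countP (· ∈ pvLive h w g) : Int) := by
    intro ds
    induction ds with
    | nil => simp [pvTgts]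
    | cons d t ih =>
      intro acc
      rw [List.foldl_cons]
      by_cases hb : 0 ≤ (r : Int) + d.1 ∧ (r : Int) + d.1 < (h : Int) ∧
          0 ≤ (c : Int) + d.2 ∧ (c : Int) + d.2 < (w : Int)
      · have htg : pvTgts h w (d :: t) r c
            = (((r : Int) + d.1).toNat, ((c : Int) + d.2).toNat) :: pvTgts h w t r c := by
          simp [pvTgts, List.filterMap_cons, hb]
        by_cases hcell : pvCell g ((r : Int) + d.1).toNat ((c : Int) + d.2).toNat = "@"
        · rw [if_pos ⟨hb.1, hb.2.1, hb.2.2.1, hb.2.2.2, hcell⟩, ih, htg, List.countP_cons]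
          have hmem : (((r : Int) + d.1).toNat, ((c : Int) + d.2).toNat) ∈ pvLive h w g := by
            rw [pvMem_live]
            exact ⟨by omega, by omega, hcell⟩
          simp only [hmem, decide_true]
          push_cast; ring
        · rw [if_neg (by tauto), ih, htg, List.countP_cons]
          have hmem : ¬ (((r : Int) + d.1).toNat, ((c : Int) + d.2).toNat) ∈ pvLive h w g := by
            rw [pvMem_live]; tauto
          simp only [hmem, decide_false]
          push_cast; ring
      · have htg : pvTgts h w (d :: t) r c = pvTgts h w t r c := by
          simp [pvTgts, List.filterMap_cons, hb]
        rw [if_neg (by tauto), ih, htg]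
  rw [pvCnt, key pvDirs 0]
  simp [pvDeg, pvNbrs]

lemma pvCntB_eq (h w : Nat) (g : List (List String)) (r c : Nat) :
    pvCntB h w g r c = (pvDeg h w (pvLive h w g) r c : Int) := by
  rw [← pvCnt_eq]
  have hif : (fun d : Int × Int =>
        if 0 ≤ (r : Int) + d.1 ∧ (r : Int) + d.1 < (h : Int) ∧
           0 ≤ (c : Int) + d.2 ∧ (c : Int) + d.2 < (w : Int) ∧
           pvCell g ((r : Int) + d.1).toNat ((c : Int) + d.2).toNat = "@"
        then (1 : Int) else 0)
      = (fun d : Int × Int =>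
        if decide (0 ≤ (r : Int) + d.1 ∧ (r : Int) + d.1 < (h : Int) ∧
           0 ≤ (c : Int) + d.2 ∧ (c : Int) + d.2 < (w : Int) ∧
           pvCell g ((r : Int) + d.1).toNat ((c : Int) + d.2).toNat = "@") = true
        then (1 : Int) else 0) := by
    funext d
    simp only [decide_eq_true_eq]
  rw [pvCntB, hif, PySem.List.sum_map_ite_one_zero, pvCnt, PySem.List.foldl_ite_add_one]
  simp

-- ---- characterizing count_neighbors ----

lemma pvSet_getD_self {α : Type} (l : List α) (i : Nat) (d : α) :
    l.set i (l.getD i d) = l := by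
  by_cases hi : i < l.length
  · rw [List.getD_eq_getElem?_getD, List.getElem?_eq_getElem hi]
    simp only [Option.getD_some]
    exact List.set_getElem_self hi
  · exact List.set_eq_of_length_le (by omega)

lemma pvFoldSet_length {α : Type} (f : Nat → α → α) (l0 : List α) (cs : List Nat) (d : α) :
    (cs.foldl (fun acc i => acc.set i (f i (acc.getD i d))) l0).length = l0.length := by
  induction cs generalizing l0 with
  | nil => rfl
  | cons c cs ih => rw [List.foldl_cons, ih, List.length_set]

lemma pvFoldSet_getD {α : Type} (f : Nat → α → α) (l0 : List α) (n j : Nat) (d : α) :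
    ((List.range n).foldl (fun acc i => acc.set i (f i (acc.getD i d))) l0).getD j d
      = if j < n ∧ j < l0.length then f j (l0.getD j d) else l0.getD j d := by
  induction n with
  | zero => simp
  | succ n ih =>
    rw [List.range_succ, List.foldl_append, List.foldl_cons, List.foldl_nil]
    have hlen := pvFoldSet_length f l0 (List.range n) d
    by_cases hj : j = n
    · subst hj
      by_cases hjl : j < l0.length
      · rw [pvGetD_set_self _ _ _ _ (by omega), ih, if_neg (by omega), if_pos ⟨by omega, hjl⟩]
      · rw [List.set_eq_of_length_le (by omega), ih, if_neg (by omega), if_neg (by omega)]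
    · rw [pvGetD_set_ne _ _ _ _ _ (Ne.symm hj), ih]
      by_cases hjn : j < n
      · by_cases hjl : j < l0.length
        · rw [if_pos ⟨hjn, hjl⟩, if_pos ⟨by omega, hjl⟩]
        · rw [if_neg (fun hh => hjl hh.2), if_neg (fun hh => hjl hh.2)]
      · rw [if_neg (fun hh => hjn hh.1), if_neg (fun hh => absurd hh.1 (by omega))]

lemma pvSet2_getD_row (N : List (List Int)) (r c : Nat) (v : Int) :
    (pvSet2 N r c v).getD r [] = (N.getD r []).set c v := by
  by_cases hr : r < N.length
  · exact pvGetD_set_self _ _ _ _ hr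
  · rw [pvSet2, List.set_eq_of_length_le (by omega)]
    rw [List.getD_eq_getElem?_getD, List.getElem?_eq_none (by omega)]
    simp

lemma pvInnerRow (g : List (List String)) (h w r : Nat) (cs : List Nat)
    (N : List (List Int)) :
    cs.foldl (fun N c => if pvCell g r c ≠ "@" then N else pvSet2 N r c (pvCnt h w g r c)) N
      = N.set r (cs.foldl
          (fun row c => if pvCell g r c ≠ "@" then row else row.set c (pvCnt h w g r c))
          (N.getD r [])) := by
  induction cs generalizing N with
  | nil =>
    simp only [List.foldl_nil]
    exact (pvSet_getD_self N r []).symm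
  | cons c cs ih =>
    simp only [List.foldl_cons]
    by_cases hcell : pvCell g r c ≠ "@"
    · rw [if_pos hcell, if_pos hcell, ih]
    · rw [if_neg hcell, if_neg hcell, ih, pvSet2_getD_row, pvSet2, List.set_set]

lemma pvCountNeighbors_getN (g : List (List String)) (r c : Nat)
    (hr : r < g.length) (hc : c < (g.getD 0 []).length) :
    pvGetN (pvCountNeighbors g) r c
      = if pvCell g r c = "@" then pvCnt g.length (g.getD 0 []).length g r c else 0 := by
  set h := g.length with hh
  set w := (g.getD 0 []).length with hw
  have houter : pvCountNeighbors g
      = (List.range h).foldl (fun acc i => acc.set i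
          ((fun (i : Nat) (row : List Int) =>
            (List.range w).foldl (fun acc2 j => acc2.set j
              ((fun (j : Nat) (x : Int) =>
                  if pvCell g i j ≠ "@" then x else pvCnt h w g i j) j (acc2.getD j 0))) row) i
            (acc.getD i [])))
        (List.replicate h (List.replicate w 0)) := by
    rw [pvCountNeighbors]
    refine PySem.List.foldl_congr_mem _ _ _ _ (fun N r _ => ?_)
    rw [pvInnerRow g h w r (List.range w) N]
    congr 1
    refine PySem.List.foldl_congr_mem _ _ _ _ (fun row j _ => ?_)
    show (if pvCell g r j ≠ "@" then row else row.set j (pvCnt h w g r j))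
      = row.set j (if pvCell g r j ≠ "@" then row.getD j 0 else pvCnt h w g r j)
    by_cases hcell : pvCell g r j ≠ "@"
    · rw [if_pos hcell, if_pos hcell, pvSet_getD_self]
    · rw [if_neg hcell, if_neg hcell]
  have h1 := pvFoldSet_getD (fun (i : Nat) (row : List Int) =>
      (List.range w).foldl (fun acc2 j => acc2.set j
        ((fun (j : Nat) (x : Int) =>
            if pvCell g i j ≠ "@" then x else pvCnt h w g i j) j (acc2.getD j 0))) row)
    (List.replicate h (List.replicate w 0)) h r []
  rw [if_pos ⟨hr, by rw [List.length_replicate]; exact hr⟩] at h1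
  have hrep : (List.replicate h (List.replicate w (0 : Int))).getD r [] = List.replicate w 0 := by
    rw [List.getD_eq_getElem?_getD, List.getElem?_replicate, if_pos hr]
    rfl
  rw [hrep] at h1
  have h2 := pvFoldSet_getD (fun (j : Nat) (x : Int) =>
      if pvCell g r j ≠ "@" then x else pvCnt h w g r j)
    (List.replicate w 0) w c 0
  rw [if_pos ⟨hc, by rw [List.length_replicate]; exact hc⟩] at h2
  have hrep2 : (List.replicate w (0 : Int)).getD c 0 = 0 := by
    rw [List.getD_eq_getElem?_getD, List.getElem?_replicate, if_pos hc]
    rfl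
  rw [hrep2] at h2
  rw [pvGetN, houter, h1, h2]
  by_cases hcell : pvCell g r c = "@"
  · rw [if_neg (not_not_intro hcell), if_pos hcell]
  · rw [if_pos hcell, if_neg hcell]

-- ---- characterizing find_initial_queue ----

lemma pvInitQueue_mem (g : List (List String)) (N : List (List Int)) (x : Nat × Nat) :
    x ∈ pvInitQueue g N ↔ x.1 < g.length ∧ x.2 < (g.getD 0 []).length ∧
      pvCell g x.1 x.2 = "@" ∧ pvGetN N x.1 x.2 < 4 := by
  rw [pvInitQueue]
  have hin : ∀ (q : List (Nat × Nat)) (r : Nat),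
      (List.range (g.getD 0 []).length).foldl
        (fun q c => if pvCell g r c = "@" ∧ pvGetN N r c < 4 then q ++ [(r, c)] else q) q
      = q ++ ((List.range (g.getD 0 []).length).filter
          (fun c => decide (pvCell g r c = "@" ∧ pvGetN N r c < 4))).map (fun c => (r, c)) := by
    intro q r
    exact PySem.List.foldl_append_ite _ _ _ _
  simp only [hin]
  rw [PySem.List.foldl_append_eq_flatMap]
  obtain ⟨x1, x2⟩ := x
  simp only [List.nil_append, List.mem_flatMap, List.mem_map, List.mem_filter,
    List.mem_range, decide_eq_true_eq, Prod.mk.injEq]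
  constructor
  · rintro ⟨r, hr, c, ⟨hcr, hcond⟩, rfl, rfl⟩
    exact ⟨hr, hcr, hcond.1, hcond.2⟩
  · rintro ⟨h1, h2, h3, h4⟩
    exact ⟨x1, h1, x2, ⟨h2, h3, h4⟩, rfl, rfl⟩

-- ---- the neighbor-table update loop ----

def pvShapeM (h w : Nat) (N : List (List Int)) : Prop :=
  N.length = h ∧ ∀ row ∈ N, row.length = w

lemma pvGetN_set2 (h w : Nat) (N : List (List Int)) (hsh : pvShapeM h w N)
    (a b x y : Nat) (ha : a < h) (hb : b < w) (v : Int) :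
    pvGetN (pvSet2 N a b v) x y = if x = a ∧ y = b then v else pvGetN N x y := by
  have hag : a < N.length := hsh.1 ▸ ha
  have hbg : b < (N.getD a []).length := by
    rw [hsh.2 _ (by
      rw [List.getD_eq_getElem?_getD, List.getElem?_eq_getElem hag]
      exact List.getElem_mem hag)]
    exact hb
  unfold pvGetN pvSet2
  by_cases hx : x = a
  · subst hx
    rw [pvGetD_set_self _ _ _ _ hag]
    by_cases hy : y = b
    · subst hy
      rw [pvGetD_set_self _ _ _ _ hbg, if_pos ⟨rfl, rfl⟩]
    · rw [pvGetD_set_ne _ _ _ _ _ (Ne.symm hy), if_neg (fun hh => hy hh.2)]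
  · rw [pvGetD_set_ne _ _ _ _ _ (fun hh => hx hh.symm), if_neg (fun hh => hx hh.1)]

lemma pvShapeM_set2 (h w : Nat) (N : List (List Int)) (a b : Nat) (v : Int)
    (hsh : pvShapeM h w N) : pvShapeM h w (pvSet2 N a b v) := by
  obtain ⟨h1, h2⟩ := hsh
  by_cases hr : a < N.length
  · refine ⟨by simpa [pvSet2] using h1, ?_⟩
    intro row hrow
    rcases List.mem_or_eq_of_mem_set hrow with hmem | rfl
    · exact h2 _ hmem
    · rw [List.length_set]
      refine h2 _ ?_
      rw [List.getD_eq_getElem?_getD, List.getElem?_eq_getElem hr]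
      exact List.getElem_mem hr
  · rw [pvSet2, List.set_eq_of_length_le (by omega)]
    exact ⟨h1, h2⟩

lemma pvUpdate_spec (h w : Nat) (g : List (List String)) (r c : Nat)
    (ds : List (Int × Int)) (hnd : (pvTgts h w ds r c).Nodup)
    (N : List (List Int)) (q : List (Nat × Nat)) (hsh : pvShapeM h w N) :
    pvShapeM h w (ds.foldl (pvStep h w g r c) (N, q)).1 ∧
    (∀ x y : Nat, x < h → y < w →
      pvGetN (ds.foldl (pvStep h w g r c) (N, q)).1 x y
        = pvGetN N x y -
          (if (x, y) ∈ pvTgts h w ds r c ∧ pvCell g x y = "@" then 1 else 0)) ∧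
    (∃ ext, (ds.foldl (pvStep h w g r c) (N, q)).2 = q ++ ext ∧
      ∀ p ∈ ext, p ∈ pvTgts h w ds r c ∧ pvCell g p.1 p.2 = "@" ∧
        pvGetN (ds.foldl (pvStep h w g r c) (N, q)).1 p.1 p.2 < 4) ∧
    (∀ t ∈ pvTgts h w ds r c, pvCell g t.1 t.2 = "@" →
      pvGetN (ds.foldl (pvStep h w g r c) (N, q)).1 t.1 t.2 < 4 →
      t ∈ (ds.foldl (pvStep h w g r c) (N, q)).2) := by
  induction ds generalizing N q with
  | nil =>
    refine ⟨hsh, ?_, ⟨[], by simp, by simp⟩, ?_⟩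
    · intro x y hx hy
      simp [pvTgts]
    · intro t ht
      simp [pvTgts] at ht
  | cons d ds ih =>
    by_cases hb : 0 ≤ (r : Int) + d.1 ∧ (r : Int) + d.1 < (h : Int) ∧
        0 ≤ (c : Int) + d.2 ∧ (c : Int) + d.2 < (w : Int)
    case neg =>
      have hstep : pvStep h w g r c (N, q) d = (N, q) := by
        rw [pvStep, if_neg hb]
      have htg : pvTgts h w (d :: ds) r c = pvTgts h w ds r c := by
        simp [pvTgts, List.filterMap_cons, hb]
      simp only [List.foldl_cons, hstep, htg]
      exact ih (htg ▸ hnd) N q hsh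
    case pos =>
      obtain ⟨u, hu'⟩ : ∃ u : Nat, (r : Int) + d.1 = (u : Int) :=
        ⟨((r : Int) + d.1).toNat, by omega⟩
      obtain ⟨v, hv'⟩ : ∃ v : Nat, (c : Int) + d.2 = (v : Int) :=
        ⟨((c : Int) + d.2).toNat, by omega⟩
      have hb' : 0 ≤ (u : Int) ∧ (u : Int) < (h : Int) ∧ 0 ≤ (v : Int) ∧ (v : Int) < (w : Int) := by
        omega
      have htg : pvTgts h w (d :: ds) r c = (u, v) :: pvTgts h w ds r c := by
        simp only [pvTgts, List.filterMap_cons, hu', hv', Int.toNat_natCast, if_pos hb']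
      have hnd2 := htg ▸ hnd
      have hndds : (pvTgts h w ds r c).Nodup := (List.nodup_cons.mp hnd2).2
      have hni : (u, v) ∉ pvTgts h w ds r c := (List.nodup_cons.mp hnd2).1
      have hua : u < h := by omega
      have hvb : v < w := by omega
      have hstep0 : ∀ st : List (List Int) × List (Nat × Nat),
          pvStep h w g r c st d
            = if pvCell g u v = "@" then
                if pvGetN (pvSet2 st.1 u v (pvGetN st.1 u v - 1)) u v < 4 then
                  (pvSet2 st.1 u v (pvGetN st.1 u v - 1), st.2 ++ [(u, v)])
                else (pvSet2 st.1 u v (pvGetN st.1 u v - 1), st.2)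
              else st := by
        intro st
        rw [pvStep, if_pos hb]
        simp only [hu', hv', Int.toNat_natCast]
      by_cases hcell : pvCell g u v = "@"
      case neg =>
        have hstep : pvStep h w g r c (N, q) d = (N, q) := by
          rw [hstep0, if_neg hcell]
        obtain ⟨ihsh, ihget, ⟨ext, hext, hextP⟩, ihcomp⟩ := ih hndds N q hsh
        simp only [List.foldl_cons, hstep, htg]
        refine ⟨ihsh, ?_, ⟨ext, hext, ?_⟩, ?_⟩
        · intro x y hx hy
          rw [ihget x y hx hy]
          congr 1
          refine if_congr ?_ rfl rfl
          constructor
          · rintro ⟨hm, hc2⟩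
            exact ⟨List.mem_cons_of_mem _ hm, hc2⟩
          · rintro ⟨hm, hc2⟩
            rcases List.mem_cons.mp hm with he | hm2
            · exfalso
              rw [Prod.mk.injEq] at he
              obtain ⟨rfl, rfl⟩ := he
              exact hcell hc2
            · exact ⟨hm2, hc2⟩
        · intro p hp
          obtain ⟨h1, h2, h3⟩ := hextP p hp
          exact ⟨List.mem_cons_of_mem _ h1, h2, h3⟩
        · intro t ht hct hlt
          rcases List.mem_cons.mp ht with rfl | hm2
          · exact absurd hct hcell
          · exact ihcomp t hm2 hct hlt
      case pos =>
        have hN1v : pvGetN (pvSet2 N u v (pvGetN N u v - 1)) u v = pvGetN N u v - 1 := by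
          rw [pvGetN_set2 h w N hsh u v u v hua hvb, if_pos ⟨rfl, rfl⟩]
        have hshN1 : pvShapeM h w (pvSet2 N u v (pvGetN N u v - 1)) :=
          pvShapeM_set2 h w N u v _ hsh
        have hstep : pvStep h w g r c (N, q) d
            = (pvSet2 N u v (pvGetN N u v - 1),
               if pvGetN (pvSet2 N u v (pvGetN N u v - 1)) u v < 4
               then q ++ [(u, v)] else q) := by
          rw [hstep0, if_pos hcell]
          split_ifs <;> rfl
        obtain ⟨ihsh, ihget, ⟨ext, hext, hextP⟩, ihcomp⟩ :=
          ih hndds (pvSet2 N u v (pvGetN N u v - 1))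
            (if pvGetN (pvSet2 N u v (pvGetN N u v - 1)) u v < 4 then q ++ [(u, v)] else q)
            hshN1
        have hgetuv : pvGetN (ds.foldl (pvStep h w g r c)
            (pvSet2 N u v (pvGetN N u v - 1),
             if pvGetN (pvSet2 N u v (pvGetN N u v - 1)) u v < 4
             then q ++ [(u, v)] else q)).1 u v = pvGetN N u v - 1 := by
          rw [ihget u v hua hvb, if_neg (fun hh => hni hh.1), hN1v]
          ring
        simp only [List.foldl_cons, hstep, htg]
        refine ⟨ihsh, ?_, ?_, ?_⟩
        · intro x y hx hy
          rw [ihget x y hx hy, pvGetN_set2 h w N hsh u v x y hua hvb]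
          by_cases hx0 : x = u ∧ y = v
          · obtain ⟨rfl, rfl⟩ := hx0
            rw [if_pos ⟨rfl, rfl⟩, if_neg (fun hh => hni hh.1),
              if_pos ⟨List.mem_cons_self, hcell⟩]
            ring
          · rw [if_neg hx0]
            congr 1
            refine if_congr ?_ rfl rfl
            constructor
            · rintro ⟨hm, hc2⟩
              exact ⟨List.mem_cons_of_mem _ hm, hc2⟩
            · rintro ⟨hm, hc2⟩
              rcases List.mem_cons.mp hm with he | hm2
              · exfalso
                rw [Prod.mk.injEq] at he
                exact hx0 he
              · exact ⟨hm2, hc2⟩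
        · refine ⟨(if pvGetN (pvSet2 N u v (pvGetN N u v - 1)) u v < 4
              then [(u, v)] else []) ++ ext, ?_, ?_⟩
          · rw [hext]
            split_ifs <;> simp
          · intro p hp
            rcases List.mem_append.mp hp with hp1 | hp2
            · split_ifs at hp1 with happ
              · rcases List.mem_singleton.mp hp1 with rfl
                refine ⟨List.mem_cons_self, hcell, ?_⟩
                rw [hgetuv, ← hN1v]
                exact happ
              · simp at hp1
            · obtain ⟨h1, h2, h3⟩ := hextP p hp2
              exact ⟨List.mem_cons_of_mem _ h1, h2, h3⟩
        · intro t ht hct hlt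
          rcases List.mem_cons.mp ht with rfl | hm2
          · have happ : pvGetN (pvSet2 N u v (pvGetN N u v - 1)) u v < 4 := by
              rw [hN1v, ← hgetuv]
              exact hlt
            rw [hext]
            refine List.mem_append.mpr (Or.inl ?_)
            rw [if_pos happ]
            exact List.mem_append.mpr (Or.inr (List.mem_singleton.mpr rfl))
          · exact ihcomp t hm2 hct hlt

-- ---- the BFS loop computes |live| - |core| ----

lemma pvLoopA_eq (h w : Nat) (g : List (List String)) (N : List (List Int))
    (q : List (Nat × Nat)) (rem : Int)
    (hs : pvShape h w g) (hshN : pvShapeM h w N)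
    (hqb : ∀ p ∈ q, p.1 < h ∧ p.2 < w)
    (hqs : ∀ p ∈ q, pvCell g p.1 p.2 = "@" → pvGetN N p.1 p.2 < 4)
    (hNdeg : ∀ x y : Nat, x < h → y < w → pvCell g x y = "@" →
      pvGetN N x y = (pvDeg h w (pvLive h w g) x y : Int))
    (hcomp : ∀ x y : Nat, x < h → y < w → pvCell g x y = "@" →
      pvDeg h w (pvLive h w g) x y < 4 → (x, y) ∈ q) :
    pvLoopA h w g N q rem
      = rem + ((pvLive h w g).card : Int) - ((pvCore h w (pvLive h w g)).card : Int) := by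
  match q with
  | [] =>
    rw [pvLoopA]
    have hclosed : pvClosed h w (pvLive h w g) := by
      intro p hp
      obtain ⟨hp1, hp2, hp3⟩ := (pvMem_live h w g p).mp hp
      by_contra hlt
      exact absurd (hcomp p.1 p.2 hp1 hp2 hp3 (by omega)) (by simp)
    rw [pvCore_eq_self h w _ hclosed]
    ring
  | (pr, pc) :: qt =>
    have hprb := hqb (pr, pc) List.mem_cons_self
    by_cases hcell : pvCell g pr pc = "@"
    case neg =>
      rw [pvLoopA, if_pos (by simpa using hcell)]
      exact pvLoopA_eq h w g N qt rem hs hshN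
        (fun p hp => hqb p (List.mem_cons_of_mem _ hp))
        (fun p hp => hqs p (List.mem_cons_of_mem _ hp))
        hNdeg
        (fun x y hx hy hc hd => by
          rcases List.mem_cons.mp (hcomp x y hx hy hc hd) with he | hm
          · exfalso
            rw [Prod.mk.injEq] at he
            obtain ⟨rfl, rfl⟩ := he
            exact hcell hc
          · exact hm)
    case pos =>
      rw [pvLoopA, if_neg (by simpa using hcell)]
      have hpr : pr < h := hprb.1
      have hpc : pc < w := hprb.2
      have hlive' : pvLive h w (pvSet2 g pr pc ".") = (pvLive h w g).erase (pr, pc) :=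
        pvLive_set2 h w g pr pc hs hpr hpc
      have hmem : (pr, pc) ∈ pvLive h w g := (pvMem_live h w g _).mpr ⟨hpr, hpc, hcell⟩
      have hdeg4 : pvDeg h w (pvLive h w g) pr pc < 4 := by
        have h1 : pvGetN N pr pc < 4 := hqs (pr, pc) List.mem_cons_self hcell
        have h2 := hNdeg pr pc hpr hpc hcell
        omega
      have hcore' : pvCore h w (pvLive h w (pvSet2 g pr pc "."))
          = pvCore h w (pvLive h w g) := by
        rw [hlive', ← Finset.sdiff_singleton_eq_erase]
        exact pvCore_sdiff h w _ _ (by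
          intro p hp
          rw [Finset.mem_singleton] at hp
          subst hp
          exact hdeg4)
      have hcard : (pvLive h w (pvSet2 g pr pc ".")).card + 1 = (pvLive h w g).card := by
        rw [hlive', Finset.card_erase_of_mem hmem]
        have := Finset.card_pos.mpr ⟨_, hmem⟩
        omega
      obtain ⟨hshN', hget, ⟨ext, hext, hextP⟩, hcompU⟩ :=
        pvUpdate_spec h w (pvSet2 g pr pc ".") pr pc pvDirs
          (pvNodup_tgts h w pvDirs pr pc pvDirs_nodup) N qt hshN
      have hs' : pvShape h w (pvSet2 g pr pc ".") := pvShape_set2 h w g pr pc "." hs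
      have hrg : pr < g.length := hs.1 ▸ hpr
      have hcw : pc < (g.getD pr []).length :=
        lt_of_lt_of_le hpc (hs.2 _ (pvRow_mem g pr hrg))
      have hcellg' : ∀ x y : Nat, pvCell (pvSet2 g pr pc ".") x y
          = if x = pr ∧ y = pc then "." else pvCell g x y :=
        fun x y => pvCell_set2 g pr pc x y "." hrg hcw
      have hdotat : ("." : String) ≠ "@" := by decide
      have hNdeg' : ∀ x y : Nat, x < h → y < w →
          pvCell (pvSet2 g pr pc ".") x y = "@" →
          pvGetN (pvDirs.foldl (pvStep h w (pvSet2 g pr pc ".") pr pc) (N, qt)).1 x y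
            = (pvDeg h w (pvLive h w (pvSet2 g pr pc ".")) x y : Int) := by
        intro x y hx hy hc'
        have hne : ¬(x = pr ∧ y = pc) := by
          intro hh
          rw [hcellg' x y, if_pos hh] at hc'
          exact hdotat hc'
        have hcg : pvCell g x y = "@" := by
          rw [hcellg' x y, if_neg hne] at hc'
          exact hc'
        have e1 := hget x y hx hy
        have e2 := hNdeg x y hx hy hcg
        have e3 := pvDeg_erase h w (pvLive h w g) (pr, pc) x y hmem
        have hsym := pvNbrs_symm h w pr pc x y hpr hpc hx hy
        rw [hlive']
        by_cases hm : (x, y) ∈ pvNbrs h w pr pc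
        · rw [e1, if_pos ⟨hm, hc'⟩, e2]
          rw [if_pos (hsym.mpr hm)] at e3
          push_cast
          omega
        · rw [e1, if_neg (fun hh => hm hh.1), e2]
          rw [if_neg (fun hh => hm (hsym.mp hh))] at e3
          push_cast
          omega
      have hqb' : ∀ p ∈ (pvDirs.foldl (pvStep h w (pvSet2 g pr pc ".") pr pc) (N, qt)).2,
          p.1 < h ∧ p.2 < w := by
        intro p hp
        rw [hext] at hp
        rcases List.mem_append.mp hp with hp1 | hp2
        · exact hqb p (List.mem_cons_of_mem _ hp1)
        · obtain ⟨h1, -, -⟩ := hextP p hp2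
          obtain ⟨hb1, hb2, -⟩ := (pvMem_tgts h w pvDirs pr pc p).mp h1
          exact ⟨hb1, hb2⟩
      have hqs' : ∀ p ∈ (pvDirs.foldl (pvStep h w (pvSet2 g pr pc ".") pr pc) (N, qt)).2,
          pvCell (pvSet2 g pr pc ".") p.1 p.2 = "@" →
          pvGetN (pvDirs.foldl (pvStep h w (pvSet2 g pr pc ".") pr pc) (N, qt)).1 p.1 p.2 < 4 := by
        intro p hp hc'
        rw [hext] at hp
        rcases List.mem_append.mp hp with hp1 | hp2
        · have hpb := hqb p (List.mem_cons_of_mem _ hp1)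
          have hne : ¬(p.1 = pr ∧ p.2 = pc) := by
            intro hh
            rw [hcellg' p.1 p.2, if_pos hh] at hc'
            exact hdotat hc'
          have hcg : pvCell g p.1 p.2 = "@" := by
            rw [hcellg' p.1 p.2, if_neg hne] at hc'
            exact hc'
          have h1 := hqs p (List.mem_cons_of_mem _ hp1) hcg
          have e1 := hget p.1 p.2 hpb.1 hpb.2
          rw [e1]
          split_ifs <;> omega
        · exact (hextP p hp2).2.2
      have hcomp' : ∀ x y : Nat, x < h → y < w →
          pvCell (pvSet2 g pr pc ".") x y = "@" →
          pvDeg h w (pvLive h w (pvSet2 g pr pc ".")) x y < 4 →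
          (x, y) ∈ (pvDirs.foldl (pvStep h w (pvSet2 g pr pc ".") pr pc) (N, qt)).2 := by
        intro x y hx hy hc' hd
        have hne : ¬(x = pr ∧ y = pc) := by
          intro hh
          rw [hcellg' x y, if_pos hh] at hc'
          exact hdotat hc'
        have hcg : pvCell g x y = "@" := by
          rw [hcellg' x y, if_neg hne] at hc'
          exact hc'
        have hsym := pvNbrs_symm h w pr pc x y hpr hpc hx hy
        by_cases hm : (x, y) ∈ pvNbrs h w pr pc
        · refine hcompU (x, y) hm hc' ?_
          rw [hNdeg' x y hx hy hc']
          exact_mod_cast hd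
        · have e3 := pvDeg_erase h w (pvLive h w g) (pr, pc) x y hmem
          rw [if_neg (fun hh => hm (hsym.mp hh))] at e3
          rw [hlive'] at hd
          have hdg : pvDeg h w (pvLive h w g) x y < 4 := by omega
          rcases List.mem_cons.mp (hcomp x y hx hy hcg hdg) with he | hm2
          · exfalso
            rw [Prod.mk.injEq] at he
            exact hne he
          · rw [hext]
            exact List.mem_append.mpr (Or.inl hm2)
      have hrec := pvLoopA_eq h w (pvSet2 g pr pc ".")
        (pvDirs.foldl (pvStep h w (pvSet2 g pr pc ".") pr pc) (N, qt)).1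
        (pvDirs.foldl (pvStep h w (pvSet2 g pr pc ".") pr pc) (N, qt)).2
        (rem + 1) hs' hshN' hqb' hqs' hNdeg' hcomp'
      show pvLoopA h w (pvSet2 g pr pc ".")
          (pvUpdate h w (pvSet2 g pr pc ".") pr pc (N, qt)).1
          (pvUpdate h w (pvSet2 g pr pc ".") pr pc (N, qt)).2
          (rem + 1)
        = rem + ((pvLive h w g).card : Int) - ((pvCore h w (pvLive h w g)).card : Int)
      rw [show pvUpdate h w (pvSet2 g pr pc ".") pr pc (N, qt)
          = pvDirs.foldl (pvStep h w (pvSet2 g pr pc ".") pr pc) (N, qt) from rfl]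
      rw [hrec, hcore']
      omega
  termination_by (pvCountAt g, q.length)
  decreasing_by
  · exact Prod.Lex.left _ _ (pvCountAt_set2_lt g pr pc hcell)
  · exact Prod.Lex.right _ (Nat.lt_succ_self _)

-- ---- the fixed-point loop computes |live| - |core| ----

lemma pvBatch_mem_iff (h w : Nat) (g : List (List String)) (x : Nat × Nat) :
    x ∈ pvBatch h w g ↔ x.1 < h ∧ x.2 < w ∧ pvCell g x.1 x.2 = "@" ∧
      pvDeg h w (pvLive h w g) x.1 x.2 < 4 := by
  obtain ⟨x1, x2⟩ := x
  simp only [pvBatch, List.mem_flatMap, List.mem_map, List.mem_filter, List.mem_range,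
    decide_eq_true_eq, Prod.mk.injEq]
  constructor
  · rintro ⟨r, hr, c, ⟨hcr, hcond⟩, rfl, rfl⟩
    have := hcond.2
    rw [pvCntB_eq] at this
    exact ⟨hr, hcr, hcond.1, by exact_mod_cast this⟩
  · rintro ⟨h1, h2, h3, h4⟩
    refine ⟨x1, h1, x2, ⟨h2, h3, ?_⟩, rfl, rfl⟩
    rw [pvCntB_eq]
    exact_mod_cast h4

lemma pvBatch_nodup (h w : Nat) (g : List (List String)) : (pvBatch h w g).Nodup := by
  rw [pvBatch, List.nodup_flatMap]
  constructor
  · intro r _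
    exact ((List.nodup_range).filter _).map
      (fun a b hab => by simpa using congrArg Prod.snd hab)
  · refine List.Pairwise.imp ?_ (List.pairwise_lt_range)
    intro r1 r2 hne
    intro s hs1 hs2
    simp only [List.mem_map, List.mem_filter] at hs1 hs2
    obtain ⟨c1, -, rfl⟩ := hs1
    obtain ⟨c2, -, he⟩ := hs2
    rw [Prod.mk.injEq] at he
    omega

lemma pvShape_foldl (h w : Nat) (l : List (Nat × Nat)) (g : List (List String))
    (hs : pvShape h w g) :
    pvShape h w (l.foldl (fun g p => pvSet2 g p.1 p.2 ".") g) := by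
  induction l generalizing g with
  | nil => exact hs
  | cons p l ih =>
    rw [List.foldl_cons]
    exact ih _ (pvShape_set2 h w g p.1 p.2 "." hs)

lemma pvLive_foldl (h w : Nat) (l : List (Nat × Nat)) (g : List (List String))
    (hs : pvShape h w g) (hb : ∀ p ∈ l, p.1 < h ∧ p.2 < w) :
    pvLive h w (l.foldl (fun g p => pvSet2 g p.1 p.2 ".") g)
      = pvLive h w g \ l.toFinset := by
  induction l generalizing g with
  | nil => simp
  | cons p l ih =>
    rw [List.foldl_cons]
    have hp := hb p List.mem_cons_self
    rw [ih _ (pvShape_set2 h w g p.1 p.2 "." hs) (fun p hp => hb p (List.mem_cons_of_mem _ hp))]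
    rw [show pvSet2 g p.1 p.2 "." = pvSet2 g (p.1, p.2).1 (p.1, p.2).2 "." from rfl,
      pvLive_set2 h w g p.1 p.2 hs hp.1 hp.2]
    ext x
    simp only [Finset.mem_sdiff, Finset.mem_erase, List.toFinset_cons, Finset.mem_insert,
      List.mem_toFinset]
    constructor
    · rintro ⟨⟨hxp, hxl⟩, hxm⟩
      exact ⟨hxl, fun hh => hh.elim (fun hh2 => hxp (hh2 ▸ rfl)) hxm⟩
    · rintro ⟨hxl, hxm⟩
      exact ⟨⟨fun hh => hxm (Or.inl (hh ▸ rfl)), hxl⟩, fun hh => hxm (Or.inr hh)⟩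

lemma pvLoopB_eq (h w : Nat) (g : List (List String)) (rem : Int)
    (hs : pvShape h w g) :
    pvLoopB h w g rem
      = rem + ((pvLive h w g).card : Int) - ((pvCore h w (pvLive h w g)).card : Int) := by
  rw [pvLoopB]
  by_cases hne : pvBatch h w g = []
  · rw [dif_pos hne]
    have hclosed : pvClosed h w (pvLive h w g) := by
      intro p hp
      obtain ⟨hp1, hp2, hp3⟩ := (pvMem_live h w g p).mp hp
      by_contra hlt
      have : p ∈ pvBatch h w g := (pvBatch_mem_iff h w g p).mpr ⟨hp1, hp2, hp3, by omega⟩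
      rw [hne] at this
      simp at this
    rw [pvCore_eq_self h w _ hclosed]
    ring
  · rw [dif_neg hne]
    have hbsub : (pvBatch h w g).toFinset ⊆ pvLive h w g := by
      intro p hp
      rw [List.mem_toFinset, pvBatch_mem_iff] at hp
      exact (pvMem_live h w g p).mpr ⟨hp.1, hp.2.1, hp.2.2.1⟩
    have hbb : ∀ p ∈ pvBatch h w g, p.1 < h ∧ p.2 < w := by
      intro p hp
      rw [pvBatch_mem_iff] at hp
      exact ⟨hp.1, hp.2.1⟩
    have hlive' := pvLive_foldl h w (pvBatch h w g) g hs hbb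
    have hcore' : pvCore h w (pvLive h w g \ (pvBatch h w g).toFinset)
        = pvCore h w (pvLive h w g) := by
      refine pvCore_sdiff h w _ _ ?_
      intro p hp
      rw [List.mem_toFinset, pvBatch_mem_iff] at hp
      exact hp.2.2.2
    have hcard : ((pvBatch h w g).toFinset).card = (pvBatch h w g).length :=
      List.toFinset_card_of_nodup (pvBatch_nodup h w g)
    have hcard2 : (pvLive h w g \ (pvBatch h w g).toFinset).card
        = (pvLive h w g).card - (pvBatch h w g).toFinset.card := by
      rw [Finset.card_sdiff, Finset.inter_eq_left.mpr hbsub]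
    have hcardle : (pvBatch h w g).toFinset.card ≤ (pvLive h w g).card :=
      Finset.card_le_card hbsub
    have hrec := pvLoopB_eq h w
      ((pvBatch h w g).foldl (fun g p => pvSet2 g p.1 p.2 ".") g)
      (rem + (pvBatch h w g).length)
      (pvShape_foldl h w (pvBatch h w g) g hs)
    rw [hrec, hlive', hcore', hcard2, hcard]
    have hcore_sub : (pvCore h w (pvLive h w g)).card ≤
        (pvLive h w g).card - (pvBatch h w g).length := by
      have h1 : pvCore h w (pvLive h w g) ⊆ pvLive h w g \ (pvBatch h w g).toFinset := by
        rw [← hcore']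
        exact pvCore_subset h w _
      have := Finset.card_le_card h1
      rw [hcard2, hcard] at this
      exact this
    omega
  termination_by pvCountAt g
  decreasing_by exact pvCountAt_batch_lt h w g hne

lemma pvFoldl_preserve {α β : Type} (P : β → Prop) (f : β → α → β) (l : List α) (init : β)
    (h0 : P init) (hstep : ∀ acc x, P acc → P (f acc x)) : P (l.foldl f init) := by
  induction l generalizing init with
  | nil => exact h0
  | cons x l ih => exact ih _ (hstep _ _ h0)

lemma pvShapeM_countNeighbors (g : List (List String)) :
    pvShapeM g.length (g.getD 0 []).length (pvCountNeighbors g) := by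
  rw [pvCountNeighbors]
  refine pvFoldl_preserve _ _ _ _ ?_ ?_
  · refine ⟨List.length_replicate, fun row hrow => ?_⟩
    rw [List.eq_of_mem_replicate hrow]
    exact List.length_replicate
  · intro acc r hacc
    refine pvFoldl_preserve _ _ _ _ hacc ?_
    intro acc2 c hacc2
    by_cases hc : pvCell g r c ≠ "@"
    · rw [if_pos hc]
      exact hacc2
    · rw [if_neg hc]
      exact pvShapeM_set2 _ _ _ _ _ _ hacc2

-- ===== VERDICT (by name: the statement is the Claim_ definition above) =====
theorem simulate_full_removal_spec : Claim_equal_simulate_full_removal := by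
  intro grid hdom hpre
  unfold Spec_simulate_full_removal
  obtain ⟨hnil, hrows⟩ := hpre
  have hhead : grid.headD [] = grid.getD 0 [] := by
    cases grid with
    | nil => exact absurd rfl hnil
    | cons a l => rfl
  have hs : pvShape grid.length (grid.getD 0 []).length grid :=
    ⟨rfl, fun row hr => by rw [← hhead]; exact hrows row hr⟩
  have hshN0 := pvShapeM_countNeighbors grid
  have hq0 := pvInitQueue_mem grid (pvCountNeighbors grid)
  have hNdeg0 : ∀ x y : Nat, x < grid.length → y < (grid.getD 0 []).length →
      pvCell grid x y = "@" →
      pvGetN (pvCountNeighbors grid) x y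
        = (pvDeg grid.length (grid.getD 0 []).length
            (pvLive grid.length (grid.getD 0 []).length grid) x y : Int) := by
    intro x y hx hy hc
    rw [pvCountNeighbors_getN grid x y hx hy, if_pos hc, pvCnt_eq]
  have hA : simulate_full_removal grid
      = pvLoopA grid.length (grid.getD 0 []).length grid (pvCountNeighbors grid)
          (pvInitQueue grid (pvCountNeighbors grid)) 0 := rfl
  have hB : simulate_full_removal_alt grid
      = pvLoopB grid.length (grid.getD 0 []).length grid 0 := rfl
  rw [hA, hB, pvLoopB_eq _ _ _ _ hs]
  rw [pvLoopA_eq grid.length (grid.getD 0 []).length grid (pvCountNeighbors grid)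
    (pvInitQueue grid (pvCountNeighbors grid)) 0 hs hshN0
    (fun p hp => ⟨((hq0 p).mp hp).1, ((hq0 p).mp hp).2.1⟩)
    (fun p hp _ => ((hq0 p).mp hp).2.2.2)
    hNdeg0
    (fun x y hx hy hc hd => (hq0 (x, y)).mpr ⟨hx, hy, hc, show
        pvGetN (pvCountNeighbors grid) x y < 4 by
      have := hNdeg0 x y hx hy hc
      omega⟩)]
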